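-- pv_equiv track=rewrite | github.com/syarasyoujyu/Deep_Past_Challenge | refine/augment/pdf/parallel_table_editor.py | replace_page_rows
-- ===== SOURCE A (Python) =====
-- def replace_page_rows(
--     existing_rows: list[dict[str, str]],
--     page_number: int,
--     new_page_rows: list[dict[str, str]],
-- ) -> list[dict[str, str]]:
--     page_key = str(page_number)
--     indices = [index for index, row in enumerate(existing_rows) if row.get("pdf_page") == page_key]
--     if indices:
--         start = indices[0]
--         end = indices[-1] + 1
--         return existing_rows[:start] + new_page_rows + existing_rows[end:]
--
--     insert_at = len(existing_rows)
--     for index, row in enumerate(existing_rows):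
--         raw_page = str(row.get("pdf_page", "")).strip()
--         if raw_page.isdigit() and int(raw_page) > page_number:
--             insert_at = index
--             break
--     return existing_rows[:insert_at] + new_page_rows + existing_rows[insert_at:]
-- ===== SOURCE B (Python) =====
-- def _split_at_first(rows, pred):
--     """Split rows into (prefix before the first row satisfying pred, rest from that row on)."""
--     head = []
--     it = iter(rows)
--     for row in it:
--         if pred(row):
--             return head, [row, *it]
--         head.append(row)
--     return head, []
--
--
-- def replace_page_rows(
--     existing_rows: list[dict[str, str]],
--     page_number: int,
--     new_page_rows: list[dict[str, str]],
-- ) -> list[dict[str, str]]: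
--     # Index-free: no enumerate, no slicing. The list is carved up purely by
--     # predicate splits; the tail after the LAST match is obtained by splitting
--     # the reversed list at its first match and reversing back.
--     page_key = str(page_number)
--
--     def matches(row):
--         return row.get("pdf_page") == page_key
--
--     def comes_after(row):
--         raw = str(row.get("pdf_page", "")).strip()
--         return raw.isdigit() and int(raw) > page_number
--
--     if any(matches(row) for row in existing_rows):
--         head, _ = _split_at_first(existing_rows, matches)
--         rhead, _ = _split_at_first(list(reversed(existing_rows)), matches)
--         return head + new_page_rows + list(reversed(rhead))
--
--     head, tail = _split_at_first(existing_rows, comes_after)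
--     return head + new_page_rows + tail
-- ===== Notes on version B (the rewrite author's own statement) =====
-- stated objective: alternative
-- what changed: B is index-free: instead of A's enumerate-based index list and integer slicing, it splits the list at the first row satisfying a predicate (prefix before first match; tail after the last match obtained by splitting the reversed list and reversing back), and splices the pieces.
import Mathlib
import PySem

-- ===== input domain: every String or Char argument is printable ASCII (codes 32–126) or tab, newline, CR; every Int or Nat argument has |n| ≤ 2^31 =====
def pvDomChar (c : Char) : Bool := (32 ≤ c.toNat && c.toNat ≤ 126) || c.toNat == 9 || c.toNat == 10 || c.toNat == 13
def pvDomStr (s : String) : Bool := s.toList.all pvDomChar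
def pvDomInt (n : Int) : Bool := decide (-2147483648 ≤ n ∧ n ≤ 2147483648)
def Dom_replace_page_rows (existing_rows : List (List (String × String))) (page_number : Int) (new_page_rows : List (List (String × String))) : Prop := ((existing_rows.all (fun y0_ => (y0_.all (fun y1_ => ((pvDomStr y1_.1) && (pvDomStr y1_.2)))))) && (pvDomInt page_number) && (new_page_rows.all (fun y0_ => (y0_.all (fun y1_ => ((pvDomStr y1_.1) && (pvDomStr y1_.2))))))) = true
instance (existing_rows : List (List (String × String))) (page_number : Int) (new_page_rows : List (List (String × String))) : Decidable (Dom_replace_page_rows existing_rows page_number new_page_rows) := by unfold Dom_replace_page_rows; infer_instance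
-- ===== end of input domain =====

-- B is index-free: it never enumerates indices or slices, it splits the list at the
-- first row satisfying a predicate (tail after the last match via the reversed list).

-- ===== PORT A =====
-- the list comprehension over enumerate: indices of rows with row.get("pdf_page") == page_key
def pvIndicesA (pk : String) : List (List (String × String)) → Nat → List Nat
  | [], _ => []
  | row :: rest, i =>
      if (row.lookup "pdf_page") == some pk then i :: pvIndicesA pk rest (i+1)
      else pvIndicesA pk rest (i+1)

-- the break-loop: the break index, or i + length from offset i if it never breaks
def pvInsertA (pn : Int) : List (List (String × String)) → Nat → Nat
  | [], i => i
  | row :: rest, i =>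
      let raw := PySem.Str.strip ((row.lookup "pdf_page").getD "")
      if PySem.Str.strIsdigit raw && (((PySem.Int.ofStr? raw).getD 0) > pn) then i
      else pvInsertA pn rest (i+1)

-- slices existing_rows[:k] / existing_rows[k:] with 0 ≤ k ≤ len are exactly take/drop
def replace_page_rows (existing_rows : List (List (String × String))) (page_number : Int) (new_page_rows : List (List (String × String))) : List (List (String × String)) :=
  let page_key := PySem.Int.toStr page_number
  match pvIndicesA page_key existing_rows 0 with
  | s :: rest =>
      existing_rows.take s ++ new_page_rows ++ existing_rows.drop ((s :: rest).getLastD 0 + 1)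
  | [] =>
      let insert_at := pvInsertA page_number existing_rows 0
      existing_rows.take insert_at ++ new_page_rows ++ existing_rows.drop insert_at

-- ===== PORT B =====
-- _split_at_first: (prefix before the first row satisfying pred, rest from that row on)
def pvSplitAtFirst (pred : List (String × String) → Bool) : List (List (String × String)) → (List (List (String × String)) × List (List (String × String)))
  | [] => ([], [])
  | row :: rest =>
      if pred row then ([], row :: rest)
      else
        let ht := pvSplitAtFirst pred rest
        (row :: ht.1, ht.2)

def pvMatchesB (pk : String) (row : List (String × String)) : Bool :=
  (row.lookup "pdf_page") == some pk

def pvComesAfterB (pn : Int) (row : List (String × String)) : Bool :=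
  let raw := PySem.Str.strip ((row.lookup "pdf_page").getD "")
  PySem.Str.strIsdigit raw && (((PySem.Int.ofStr? raw).getD 0) > pn)

def replace_page_rows_alt (existing_rows : List (List (String × String))) (page_number : Int) (new_page_rows : List (List (String × String))) : List (List (String × String)) :=
  let page_key := PySem.Int.toStr page_number
  if existing_rows.any (pvMatchesB page_key) then
    let head := (pvSplitAtFirst (pvMatchesB page_key) existing_rows).1
    let rhead := (pvSplitAtFirst (pvMatchesB page_key) existing_rows.reverse).1
    head ++ new_page_rows ++ rhead.reverse
  else
    let ht := pvSplitAtFirst (pvComesAfterB page_number) existing_rows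
    ht.1 ++ new_page_rows ++ ht.2

-- ===== PRECONDITION & SPEC =====
def Spec_replace_page_rows (existing_rows : List (List (String × String))) (page_number : Int) (new_page_rows : List (List (String × String))) (out : List (List (String × String))) : Prop := out = replace_page_rows_alt existing_rows page_number new_page_rows
instance (existing_rows : List (List (String × String))) (page_number : Int) (new_page_rows : List (List (String × String))) (out : List (List (String × String))) : Decidable (Spec_replace_page_rows existing_rows page_number new_page_rows out) := by unfold Spec_replace_page_rows; infer_instance

-- ===== CLAIM =====
def Claim_equal_replace_page_rows : Prop := ∀ (existing_rows : List (List (String × String))) (page_number : Int) (new_page_rows : List (List (String × String))), Dom_replace_page_rows existing_rows page_number new_page_rows → Spec_replace_page_rows existing_rows page_number new_page_rows (replace_page_rows existing_rows page_number new_page_rows)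

-- ===== LEMMAS AND PROOFS =====
theorem pvGetLastD_mem (l : List Nat) (d : Nat) (h : l ≠ []) : l.getLastD d ∈ l := by
  induction l with
  | nil => exact absurd rfl h
  | cons a t ih =>
      cases t with
      | nil => simp
      | cons b t' => simpa using Or.inr (ih (by simp))

theorem pvSplit_eq (pred : List (String × String) → Bool) :
    ∀ l, pvSplitAtFirst pred l = (l.takeWhile (fun r => !pred r), l.dropWhile (fun r => !pred r)) := by
  intro l; induction l with
  | nil => rfl
  | cons r rest ih =>
      by_cases h : pred r = true
      · simp [pvSplitAtFirst, List.takeWhile, List.dropWhile, h]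
      · simp only [Bool.not_eq_true] at h
        simp [pvSplitAtFirst, List.takeWhile, List.dropWhile, h, ih]

theorem pvIndicesA_nil_iff (pk : String) :
    ∀ (l : List (List (String × String))) (i : Nat),
      (pvIndicesA pk l i = [] ↔ l.any (pvMatchesB pk) = false) := by
  intro l; induction l with
  | nil => intro i; simp [pvIndicesA]
  | cons r rest ih =>
      intro i
      by_cases h : ((r.lookup "pdf_page") == some pk) = true
      · simp [pvIndicesA, pvMatchesB, h]
      · simp only [Bool.not_eq_true] at h
        simp [pvIndicesA, pvMatchesB, h, ih]

theorem pvIndicesA_map (pk : String) :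
    ∀ (l : List (List (String × String))) (i : Nat),
      pvIndicesA pk l i = (pvIndicesA pk l 0).map (· + i) := by
  intro l; induction l with
  | nil => intro i; simp [pvIndicesA]
  | cons r rest ih =>
      intro i
      by_cases h : ((r.lookup "pdf_page") == some pk) = true
      · simp [pvIndicesA, h, ih (i+1), ih 1, List.map_map]
        intro a _; omega
      · simp only [Bool.not_eq_true] at h
        simp [pvIndicesA, h, ih (i+1), ih 1, List.map_map]
        intro a _; omega

theorem pvIndicesA_append (pk : String) :
    ∀ (a b : List (List (String × String))) (i : Nat),
      pvIndicesA pk (a ++ b) i = pvIndicesA pk a i ++ pvIndicesA pk b (i + a.length) := by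
  intro a; induction a with
  | nil => intro b i; simp [pvIndicesA]
  | cons r rest ih =>
      intro b i
      by_cases h : ((r.lookup "pdf_page") == some pk) = true
      · simp [pvIndicesA, h, ih b (i+1)]; ring_nf
      · simp only [Bool.not_eq_true] at h
        simp [pvIndicesA, h, ih b (i+1)]; ring_nf

theorem pvIndicesA_bound (pk : String) :
    ∀ (l : List (List (String × String))) (i j : Nat),
      j ∈ pvIndicesA pk l i → j < i + l.length := by
  intro l; induction l with
  | nil => intro i j h; simp [pvIndicesA] at h
  | cons r rest ih =>
      intro i j h
      by_cases hm : ((r.lookup "pdf_page") == some pk) = true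
      · simp [pvIndicesA, hm] at h
        rcases h with h | h
        · simp [h]
        · have := ih (i+1) j h; simp; omega
      · simp only [Bool.not_eq_true] at hm
        simp [pvIndicesA, hm] at h
        have := ih (i+1) j h; simp; omega

-- first matching index: the prefix before it is exactly the takeWhile prefix
theorem pvFirst (pk : String) :
    ∀ (l : List (List (String × String))) (s : Nat) (rest : List Nat),
      pvIndicesA pk l 0 = s :: rest →
      l.take s = l.takeWhile (fun r => !pvMatchesB pk r) := by
  intro l; induction l with
  | nil => intro s rest h; simp [pvIndicesA] at h
  | cons r t ih =>
      intro s rest h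
      by_cases hm : ((r.lookup "pdf_page") == some pk) = true
      · simp only [pvIndicesA, hm, if_true] at h
        injection h with h1 h2
        rw [← h1]
        simp [pvMatchesB, hm]
      · simp only [Bool.not_eq_true] at hm
        simp only [pvIndicesA, hm, Bool.false_eq_true, if_false] at h
        rw [pvIndicesA_map pk t 1] at h
        cases h0 : pvIndicesA pk t 0 with
        | nil => rw [h0] at h; simp at h
        | cons s' rest' =>
            rw [h0] at h; simp at h
            have hs : s = s' + 1 := by omega
            subst hs
            simp [List.takeWhile, pvMatchesB, hm, List.take, ih s' rest' h0]

-- tail after the last matching index = reversed takeWhile-prefix of the reversed list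
theorem pvLast (pk : String) :
    ∀ (l : List (List (String × String))),
      pvIndicesA pk l 0 ≠ [] →
      l.drop ((pvIndicesA pk l 0).getLastD 0 + 1)
        = (l.reverse.takeWhile (fun r => !pvMatchesB pk r)).reverse := by
  intro l
  induction l using List.reverseRecOn with
  | nil => intro h; simp [pvIndicesA] at h
  | append_singleton l' x ih =>
      intro h
      rw [pvIndicesA_append pk l' [x] 0] at h ⊢
      by_cases hm : ((x.lookup "pdf_page") == some pk) = true
      · simp only [pvIndicesA, hm, if_true, Nat.zero_add]
        have hlast : (pvIndicesA pk l' 0 ++ [l'.length]).getLastD 0 = l'.length :=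
          List.getLastD_concat
        rw [hlast]
        have hdrop : (l' ++ [x]).drop (l'.length + 1) = [] := by simp
        rw [hdrop]
        simp [pvMatchesB, hm]
      · simp only [Bool.not_eq_true] at hm
        simp only [pvIndicesA, hm, Bool.false_eq_true, if_false] at h ⊢
        simp only [List.append_nil] at h ⊢
        have hmem : (pvIndicesA pk l' 0).getLastD 0 ∈ pvIndicesA pk l' 0 :=
          pvGetLastD_mem _ 0 h
        have hlt := pvIndicesA_bound pk l' 0 _ hmem
        simp only [Nat.zero_add] at hlt
        have hdrop : (l' ++ [x]).drop ((pvIndicesA pk l' 0).getLastD 0 + 1)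
            = l'.drop ((pvIndicesA pk l' 0).getLastD 0 + 1) ++ [x] := by
          rw [List.drop_append_of_le_length (by omega)]
        rw [hdrop, ih h]
        simp [pvMatchesB, hm]

theorem pvInsertA_eq (pn : Int) :
    ∀ (l : List (List (String × String))) (i : Nat),
      pvInsertA pn l i = i + (l.takeWhile (fun r => !pvComesAfterB pn r)).length := by
  intro l; induction l with
  | nil => intro i; simp [pvInsertA]
  | cons r rest ih =>
      intro i
      rw [show pvInsertA pn (r :: rest) i
            = (if pvComesAfterB pn r = true then i else pvInsertA pn rest (i+1)) from rfl]
      cases hc : pvComesAfterB pn r with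
      | true => simp [hc, List.takeWhile]
      | false =>
          simp [hc, List.takeWhile, ih (i+1)]
          omega

theorem pvTakeDrop {α : Type} (q : α → Bool) :
    ∀ (l : List α), l.take (l.takeWhile q).length = l.takeWhile q
      ∧ l.drop (l.takeWhile q).length = l.dropWhile q := by
  intro l; induction l with
  | nil => simp
  | cons r rest ih =>
      by_cases h : q r = true
      · simp [List.takeWhile, List.dropWhile, h, ih.1, ih.2]
      · simp only [Bool.not_eq_true] at h
        simp [List.takeWhile, List.dropWhile, h]

-- ===== VERDICT =====
theorem replace_page_rows_spec : Claim_equal_replace_page_rows := by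
  intro existing_rows page_number new_page_rows _hdom
  unfold Spec_replace_page_rows replace_page_rows replace_page_rows_alt
  dsimp only
  by_cases hany : existing_rows.any (pvMatchesB (PySem.Int.toStr page_number)) = true
  · have hne : pvIndicesA (PySem.Int.toStr page_number) existing_rows 0 ≠ [] := by
      intro h0
      rw [pvIndicesA_nil_iff] at h0
      rw [hany] at h0; exact Bool.true_eq_false.mp h0
    cases h0 : pvIndicesA (PySem.Int.toStr page_number) existing_rows 0 with
    | nil => exact absurd h0 hne
    | cons s rest =>
        simp only [hany, if_true, pvSplit_eq]
        rw [pvFirst _ _ _ _ h0, ← h0, pvLast _ _ hne]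
  · simp only [Bool.not_eq_true] at hany
    have h0 : pvIndicesA (PySem.Int.toStr page_number) existing_rows 0 = [] := by
      rw [pvIndicesA_nil_iff]; exact hany
    simp only [h0, hany, Bool.false_eq_true, if_false, pvSplit_eq]
    rw [pvInsertA_eq]
    simp only [Nat.zero_add]
    rw [(pvTakeDrop _ existing_rows).1, (pvTakeDrop _ existing_rows).2]
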